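-- pv_equiv track=rewrite | github.com/rbalroop/EECS4312_Lab5_SpecificationLab_B_216906349 | src/solution.py | build_total_request
-- ===== SOURCE A (Python) =====
-- def build_total_request(requests):
--     total_requests = {}
--     for request in requests:
--         for key in request:
--             if key in total_requests:
--                 total_requests[key] += request[key]
--             else:
--                 total_requests[key] = request[key]
--     return total_requests
-- ===== SOURCE B (Python) =====
-- def build_total_request(requests):
--     keys = list(dict.fromkeys(k for request in requests for k in request))
--     return {k: sum(request[k] for request in requests if k in request) for k in keys}
-- ===== Notes on version B (the rewrite author's own statement) =====
-- stated objective: alternative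
-- what changed: Replaces A's single pass that maintains running totals in a dict with two staged passes: first collect the distinct keys in first-appearance order (dict.fromkeys), then build the result with a dict comprehension that, for each key, sums its values across all requests.
import Mathlib
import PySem

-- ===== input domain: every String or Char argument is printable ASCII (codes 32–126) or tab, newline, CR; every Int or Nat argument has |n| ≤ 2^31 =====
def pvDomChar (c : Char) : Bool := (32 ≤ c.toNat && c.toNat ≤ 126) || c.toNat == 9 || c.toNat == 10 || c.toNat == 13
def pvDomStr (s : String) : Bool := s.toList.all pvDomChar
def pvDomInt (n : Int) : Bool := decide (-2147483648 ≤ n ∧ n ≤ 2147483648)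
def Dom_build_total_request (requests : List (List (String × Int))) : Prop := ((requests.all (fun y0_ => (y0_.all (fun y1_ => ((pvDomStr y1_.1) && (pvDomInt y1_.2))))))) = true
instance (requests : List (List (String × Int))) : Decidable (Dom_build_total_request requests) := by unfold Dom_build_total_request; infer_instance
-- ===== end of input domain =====

-- B replaces A's single accumulating pass by two staged passes: collect the distinct keys in
-- first-appearance order, then sum each key's values across all requests (objective: alternative).

-- ===== PORT A =====
-- Each element of `requests` is a Python dict: realised as PySem.Dict.ofList (last value wins on
-- a duplicate key, insertion order); A iterates over its keys and looks each up with getD 0 —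
-- exact, since every key iterated is present in the dict.
def build_total_request (requests : List (List (String × Int))) : List (String × Int) :=
  (requests.foldl
    (fun (total_requests : PySem.Dict String Int) request =>
      (PySem.Dict.ofList request).keys.foldl
        (fun total_requests key =>
          if total_requests.contains key then
            total_requests.modify key 0 (· + (PySem.Dict.ofList request).getD key 0)
          else
            total_requests.insert key ((PySem.Dict.ofList request).getD key 0))
        total_requests)
    PySem.Dict.empty).items

-- ===== PORT B =====
-- keys = list(dict.fromkeys(k for request in requests for k in request))  — PySem.List.dedup;
-- the dict comprehension is a fresh dict built key by key, each value the sum of that key's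
-- values over the requests that contain it (sum of a filtered generator).
def build_total_request_alt (requests : List (List (String × Int))) : List (String × Int) :=
  let keys := PySem.List.dedup (requests.flatMap (fun request => (PySem.Dict.ofList request).keys))
  (keys.foldl
    (fun (d : PySem.Dict String Int) k =>
      d.insert k
        (((requests.filter (fun request => (PySem.Dict.ofList request).contains k)).map
            (fun request => (PySem.Dict.ofList request).getD k 0)).sum))
    PySem.Dict.empty).items

-- ===== PRECONDITION & SPEC =====
def Spec_build_total_request (requests : List (List (String × Int))) (out : List (String × Int)) : Prop := out = build_total_request_alt requests
instance (requests : List (List (String × Int))) (out : List (String × Int)) : Decidable (Spec_build_total_request requests out) := by unfold Spec_build_total_request; infer_instance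

-- ===== CLAIM (what is proved, stated in full; the proofs are below) =====
def Claim_equal_build_total_request : Prop := ∀ (requests : List (List (String × Int))), Dom_build_total_request requests → Spec_build_total_request requests (build_total_request requests)

-- ===== LEMMAS AND PROOFS =====

-- the per-key total B computes for key k
def btrSum (requests : List (List (String × Int))) (k : String) : Int :=
  ((requests.filter (fun request => (PySem.Dict.ofList request).contains k)).map
      (fun request => (PySem.Dict.ofList request).getD k 0)).sum

-- A's inner loop in insert form
def btrInner (d : PySem.Dict String Int) (request : List (String × Int)) : PySem.Dict String Int :=
  (PySem.Dict.ofList request).keys.foldl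
    (fun d key => d.insert key (d.getD key 0 + (PySem.Dict.ofList request).getD key 0)) d

-- A's if/else step equals the insert step, for every accumulator and key.
theorem btr_step_eq (d : PySem.Dict String Int) (k : String) (v : Int) :
    (if d.contains k then d.modify k 0 (· + v) else d.insert k v)
      = d.insert k (d.getD k 0 + v) := by
  by_cases h : d.contains k = true
  · rw [if_pos h]
    rfl
  · rw [if_neg h, PySem.Dict.getD_of_not_contains d 0 (by simpa using h), zero_add]

theorem btr_inner_eq (d : PySem.Dict String Int) (request : List (String × Int)) :
    (PySem.Dict.ofList request).keys.foldl
      (fun total_requests key =>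
        if total_requests.contains key then
          total_requests.modify key 0 (· + (PySem.Dict.ofList request).getD key 0)
        else
          total_requests.insert key ((PySem.Dict.ofList request).getD key 0)) d
      = btrInner d request := by
  unfold btrInner
  congr 1
  funext acc key
  exact btr_step_eq acc key ((PySem.Dict.ofList request).getD key 0)

-- a fold of inserts over Nodup keys: lookup afterwards
theorem btr_getD_foldK (K : List String) (hK : K.Nodup) (f : String → Int)
    (d : PySem.Dict String Int) (k : String) :
    (K.foldl (fun d key => d.insert key (d.getD key 0 + f key)) d).getD k 0
      = d.getD k 0 + (if k ∈ K then f k else 0) := by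
  induction K generalizing d with
  | nil => simp
  | cons a K ih =>
    simp only [List.foldl_cons]
    rcases List.nodup_cons.mp hK with ⟨ha, hK'⟩
    by_cases hk : k = a
    · subst hk
      rw [ih hK', if_neg ha, add_zero, PySem.Dict.getD_insert_self]
      simp
    · rw [ih hK', PySem.Dict.getD_insert, if_neg hk]
      simp [List.mem_cons, hk]

theorem btr_getD_inner (d : PySem.Dict String Int) (r : List (String × Int)) (k : String) :
    (btrInner d r).getD k 0
      = d.getD k 0 + (if (PySem.Dict.ofList r).contains k then (PySem.Dict.ofList r).getD k 0 else 0) := by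
  unfold btrInner
  rw [btr_getD_foldK _ (PySem.Dict.nodup_keys_ofList r) _ d k]
  congr 1
  by_cases h : (PySem.Dict.ofList r).contains k = true
  · rw [if_pos h, if_pos ((PySem.Dict.contains_iff_mem_keys _ _).mp h)]
  · rw [if_neg h, if_neg (fun hm => h ((PySem.Dict.contains_iff_mem_keys _ _).mpr hm))]

theorem btr_keys_inner (d : PySem.Dict String Int) (r : List (String × Int)) :
    (btrInner d r).keys = PySem.Set.update d.keys (PySem.Dict.ofList r).keys := by
  unfold btrInner
  exact PySem.Dict.keys_foldl_insert _ _ _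

theorem btr_nodup_inner (d : PySem.Dict String Int) (r : List (String × Int))
    (h : d.keys.Nodup) : (btrInner d r).keys.Nodup := by
  unfold btrInner
  exact PySem.Dict.nodup_keys_foldl_insert _ _ _ h

-- the whole A fold: lookup afterwards
theorem btr_getD_main (rs : List (List (String × Int))) (d : PySem.Dict String Int) (k : String) :
    (rs.foldl btrInner d).getD k 0 = d.getD k 0 + btrSum rs k := by
  induction rs generalizing d with
  | nil => simp [btrSum]
  | cons r rs ih =>
    simp only [List.foldl_cons]
    rw [ih, btr_getD_inner]
    have : btrSum (r :: rs) k
        = (if (PySem.Dict.ofList r).contains k then (PySem.Dict.ofList r).getD k 0 else 0)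
          + btrSum rs k := by
      unfold btrSum
      by_cases h : (PySem.Dict.ofList r).contains k = true
      · simp [h]
      · simp [h]
    rw [this, add_assoc]

theorem btr_keys_main (rs : List (List (String × Int))) (d : PySem.Dict String Int) :
    (rs.foldl btrInner d).keys
      = PySem.Set.update d.keys (rs.flatMap (fun r => (PySem.Dict.ofList r).keys)) := by
  induction rs generalizing d with
  | nil => simp [PySem.Set.update_nil]
  | cons r rs ih =>
    simp only [List.foldl_cons, List.flatMap_cons]
    rw [ih, btr_keys_inner, PySem.Set.update_append]

theorem btr_nodup_main (rs : List (List (String × Int))) (d : PySem.Dict String Int)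
    (h : d.keys.Nodup) : (rs.foldl btrInner d).keys.Nodup := by
  induction rs generalizing d with
  | nil => exact h
  | cons r rs ih => exact ih _ (btr_nodup_inner _ _ h)

-- B's dict comprehension over the (Nodup, fresh) key list appends its items one by one.
theorem btr_alt_items (requests : List (List (String × Int))) :
    build_total_request_alt requests
      = (PySem.List.dedup (requests.flatMap (fun r => (PySem.Dict.ofList r).keys))).map
          (fun k => (k, btrSum requests k)) := by
  have hrfl : build_total_request_alt requests
      = ((PySem.List.dedup (requests.flatMap (fun r => (PySem.Dict.ofList r).keys))).foldl
          (fun (d : PySem.Dict String Int) k => d.insert k (btrSum requests k))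
          PySem.Dict.empty).items := rfl
  rw [hrfl]
  refine (PySem.Dict.items_foldl_insert_fresh
      (PySem.List.dedup (requests.flatMap (fun r => (PySem.Dict.ofList r).keys)))
      (fun x => x) (fun k => btrSum requests k) PySem.Dict.empty
      (by intro a _; exact PySem.Dict.contains_empty a)
      (by simp)).trans ?_
  simp [PySem.Dict.empty]

-- ===== VERDICT (by name: the statement is the Claim_ definition above) =====
theorem build_total_request_spec : Claim_equal_build_total_request := by
  intro requests _
  unfold Spec_build_total_request
  unfold build_total_request
  have hfold :
      (requests.foldl
        (fun (total_requests : PySem.Dict String Int) request =>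
          (PySem.Dict.ofList request).keys.foldl
            (fun total_requests key =>
              if total_requests.contains key then
                total_requests.modify key 0 (· + (PySem.Dict.ofList request).getD key 0)
              else
                total_requests.insert key ((PySem.Dict.ofList request).getD key 0))
            total_requests)
        PySem.Dict.empty)
      = requests.foldl btrInner PySem.Dict.empty := by
    congr 1
    funext d r
    exact btr_inner_eq d r
  rw [hfold]
  have hnd : (requests.foldl btrInner PySem.Dict.empty).keys.Nodup :=
    btr_nodup_main requests _ (by simp)
  rw [PySem.Dict.items_eq_map_keys _ hnd 0, btr_keys_main, btr_alt_items]
  have hkeys : PySem.Set.update (PySem.Dict.empty : PySem.Dict String Int).keys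
        (requests.flatMap (fun r => (PySem.Dict.ofList r).keys))
      = PySem.List.dedup (requests.flatMap (fun r => (PySem.Dict.ofList r).keys)) := by
    rw [PySem.List.dedup_eq_ofList]
    simp [PySem.Set.update_nil_left]
  rw [hkeys]
  apply List.map_congr_left
  intro k _
  rw [btr_getD_main]
  simp [btrSum]
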